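-- pv_equiv track=rewrite | github.com/wilmurillo-ai/Design-Assistant | .skills/openclaw-skills/skills/haweiyu/wechat-article/scripts/wechat_article.py | parse_jina_content
-- ===== SOURCE A (Python) =====
-- def parse_jina_content(content: str) -> dict:
--     """
--     解析 jina.ai 返回的内容，提取标题和正文
--     """
--     lines = content.split("\n")
--     title = ""
--     body_lines = []
--     in_body = False
--
--     for i, line in enumerate(lines):
--         line = line.strip()
--
--         # 第一行非空通常是标题
--         if not title and line and not line.startswith("http"):
--             title = line.lstrip("# ").strip()
--             continue
--
--         # 跳过 URL 行
--         if line.startswith("http"):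
--             continue
--
--         # 跳过空行标记
--         if line == "---":
--             continue
--
--         body_lines.append(line)
--
--     # 清理正文
--     body = "\n".join(body_lines).strip()
--
--     # 尝试提取发布时间和公众号
--     publish_time = ""
--     account = ""
--
--     return {
--         "title": title,
--         "content": body,
--         "publish_time": publish_time,
--         "account": account
--     }
-- ===== SOURCE B (Python) =====
-- def parse_jina_content(content: str) -> dict:
--     """Parse jina.ai content extracting title and body (two-phase: locate title, then filter)."""
--     lines = [l.strip() for l in content.split("\n")]
--     title = ""
--     t = len(lines)  # index of the line consumed as the title; len(lines) = every candidate consumed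
--     for i, l in enumerate(lines):
--         if l and not l.startswith("http"):
--             cand = l.lstrip("# ").strip()
--             if cand:
--                 title, t = cand, i
--                 break
--     body = "\n".join(
--         l for i, l in enumerate(lines)
--         if not l.startswith("http") and l != "---" and (not l or i > t)
--     ).strip()
--     return {"title": title, "content": body, "publish_time": "", "account": ""}
-- ===== Notes on version B (the rewrite author's own statement) =====
-- stated objective: simpler
-- what changed: Replaces A's single stateful loop (title flag plus body accumulator with continue branches) by a two-phase decomposition: strip all lines once, scan for the first line that yields a nonempty title after removing leading hash marks and spaces, then build the body in one filtering comprehension over the enumerated stripped lines.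
import Mathlib
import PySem

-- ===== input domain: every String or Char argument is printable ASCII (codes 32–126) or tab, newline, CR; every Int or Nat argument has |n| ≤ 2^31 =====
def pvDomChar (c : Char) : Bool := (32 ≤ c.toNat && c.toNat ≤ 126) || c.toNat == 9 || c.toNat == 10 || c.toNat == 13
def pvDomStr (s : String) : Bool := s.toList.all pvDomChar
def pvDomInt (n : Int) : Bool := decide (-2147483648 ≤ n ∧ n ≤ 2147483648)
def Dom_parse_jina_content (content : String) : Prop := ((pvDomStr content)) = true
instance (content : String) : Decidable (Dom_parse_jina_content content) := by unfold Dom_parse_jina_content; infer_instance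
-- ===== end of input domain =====

-- B computes the same dict by a two-phase decomposition (locate the title line first, then one
-- filtering pass over the enumerated lines) instead of A's single stateful loop; objective: simpler.

-- shared primitive: exact port of Python's s.lstrip("# ") — drop leading chars from the set {'#',' '}
def pvLstripHS (s : String) : String :=
  String.ofList (s.toList.dropWhile (fun c => c == '#' || c == ' '))

-- ===== PORT A =====
-- A's loop body, applied to the already-stripped line (A strips at the top of each iteration)
def pvStepA (st : String × List String) (line : String) : String × List String :=
  if st.1 == "" && line != "" && !(PySem.Str.startswith line "http") then
    (PySem.Str.strip (pvLstripHS line), st.2)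
  else if PySem.Str.startswith line "http" then st
  else if line == "---" then st
  else (st.1, st.2 ++ [line])

def parse_jina_content (content : String) : List (String × String) :=
  let lines := (PySem.Str.split? content "\n").getD []   -- sep is the nonempty "\n": split? is some
  let r := lines.foldl (fun st line0 => pvStepA st (PySem.Str.strip line0)) ("", [])
  let body := PySem.Str.strip (PySem.Str.join "\n" r.2)
  [("title", r.1), ("content", body), ("publish_time", ""), ("account", "")]

-- ===== PORT B =====
-- Source B's first phase: scan for the first line that yields a nonempty title candidate
def pvFindTitle : List String → Int → Option (String × Int)
  | [], _ => none
  | l :: ls, i =>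
    if l != "" && !(PySem.Str.startswith l "http") then
      let cand := PySem.Str.strip (pvLstripHS l)
      if cand != "" then some (cand, i) else pvFindTitle ls (i + 1)
    else pvFindTitle ls (i + 1)

-- Source B's comprehension condition, given the title index t
def pvPred (t : Int) (p : Int × String) : Bool :=
  !(PySem.Str.startswith p.2 "http") && p.2 != "---" && (p.2 == "" || decide (t < p.1))

def parse_jina_content_alt (content : String) : List (String × String) :=
  let lines := ((PySem.Str.split? content "\n").getD []).map PySem.Str.strip
  let tt := (pvFindTitle lines 0).getD ("", (lines.length : Int))
  let bodyLines := ((PySem.List.enumerate lines 0).filter (pvPred tt.2)).map (·.2)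
  let body := PySem.Str.strip (PySem.Str.join "\n" bodyLines)
  [("title", tt.1), ("content", body), ("publish_time", ""), ("account", "")]

-- ===== PRECONDITION & SPEC =====
def Spec_parse_jina_content (content : String) (out : List (String × String)) : Prop := out = parse_jina_content_alt content
instance (content : String) (out : List (String × String)) : Decidable (Spec_parse_jina_content content out) := by unfold Spec_parse_jina_content; infer_instance

-- ===== CLAIM (what is proved, stated in full; the proofs are below) =====
def Claim_equal_parse_jina_content : Prop := ∀ (content : String), Dom_parse_jina_content content → Spec_parse_jina_content content (parse_jina_content content)

-- ===== LEMMAS AND PROOFS =====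

-- once the title is set, the rest of A's loop is a plain filter
theorem foldA_titled (L : List String) (title : String) (acc : List String)
    (h : title ≠ "") :
    L.foldl pvStepA (title, acc) =
      (title, acc ++ L.filter (fun l => !(PySem.Str.startswith l "http") && l != "---")) := by
  induction L generalizing acc with
  | nil => simp
  | cons l ls ih =>
    simp only [List.foldl_cons, List.filter_cons]
    have ht : (title == "") = false := by simpa using h
    by_cases hh : PySem.Chars.startswith l.toList ['h','t','t','p'] = true
    · simp [pvStepA, ht, hh, ih]
    · by_cases hd : l = "---"
      · simp [pvStepA, ht, hd, ih]
      · simp [pvStepA, ht, hh, hd, ih]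

theorem findTitle_ge (L : List String) (s : Int) (c : String) (t : Int)
    (h : pvFindTitle L s = some (c, t)) : s ≤ t := by
  induction L generalizing s with
  | nil => simp [pvFindTitle] at h
  | cons l ls ih =>
    simp only [pvFindTitle] at h
    split at h
    · split at h
      · simp at h; omega
      · have := ih (s + 1) h; omega
    · have := ih (s + 1) h; omega

-- once every index is beyond the title index, B's filter ignores the index
theorem enumFilter (L : List String) (s t : Int) (h : t < s) :
    ((PySem.List.enumerate L s).filter (pvPred t)).map (·.2) =
      L.filter (fun l => !(PySem.Str.startswith l "http") && l != "---") := by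
  induction L generalizing s with
  | nil => simp [PySem.List.enumerate_nil]
  | cons l ls ih =>
    rw [PySem.List.enumerate_cons]
    simp only [List.filter_cons]
    have h1 : decide (t < s) = true := by simpa using h
    by_cases hh : PySem.Chars.startswith l.toList ['h','t','t','p'] = true
    · simp [pvPred, hh, ih (s + 1) (by omega)]
    · by_cases hd : l = "---"
      · simp [pvPred, hd, ih (s + 1) (by omega)]
      · simp [pvPred, hh, hd, h1, ih (s + 1) (by omega)]

-- the core invariant: A's stateful loop equals B's two-phase computation, from any start index
theorem pvCore (L : List String) (acc : List String) (s : Int) :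
    L.foldl pvStepA ("", acc) =
      ( ((pvFindTitle L s).getD ("", s + L.length)).1,
        acc ++ ((PySem.List.enumerate L s).filter
          (pvPred ((pvFindTitle L s).getD ("", s + L.length)).2)).map (·.2) ) := by
  induction L generalizing acc s with
  | nil => simp [pvFindTitle, PySem.List.enumerate_nil]
  | cons l ls ih =>
    have hlen : s + (((l :: ls).length : Nat) : Int) = (s + 1) + (ls.length : Int) := by
      simp; omega
    rw [List.foldl_cons, PySem.List.enumerate_cons]
    by_cases hne : l = ""
    · -- empty line: both keep it for the body
      subst hne
      have h0 : PySem.Chars.startswith ([] : List Char) ['h','t','t','p'] = false := by decide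
      have hstep : pvStepA ("", acc) "" = ("", acc ++ [""]) := by
        simp [pvStepA, h0]
      rw [hstep, ih (acc ++ [""]) (s + 1)]
      have hft : pvFindTitle ("" :: ls) s = pvFindTitle ls (s + 1) := by
        simp [pvFindTitle]
      rw [hft, hlen]
      have hkeep : ∀ t, pvPred t (s, "") = true := by
        intro t; simp [pvPred, h0]
      simp [hkeep]
    · by_cases hh : PySem.Chars.startswith l.toList ['h','t','t','p'] = true
      · -- http line: skipped by both
        have hstep : pvStepA ("", acc) l = ("", acc) := by
          simp [pvStepA, hh]
        rw [hstep, ih acc (s + 1)]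
        have hft : pvFindTitle (l :: ls) s = pvFindTitle ls (s + 1) := by
          simp [pvFindTitle, hh]
        rw [hft, hlen]
        have hdrop : ∀ t, pvPred t (s, l) = false := by
          intro t; simp [pvPred, hh]
        simp [hdrop]
      · by_cases hc : PySem.Str.strip (pvLstripHS l) = ""
        · -- qualifying line with empty candidate: A consumes it, B's scan moves on
          have hstep : pvStepA ("", acc) l = ("", acc) := by
            simp [pvStepA, hne, hh, hc]
          rw [hstep, ih acc (s + 1)]
          have hft : pvFindTitle (l :: ls) s = pvFindTitle ls (s + 1) := by
            simp [pvFindTitle, hne, hh, hc]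
          rw [hft, hlen]
          have hts : s < ((pvFindTitle ls (s + 1)).getD ("", (s + 1) + ls.length)).2 := by
            cases hft2 : pvFindTitle ls (s + 1) with
            | none => simp; omega
            | some p =>
              have := findTitle_ge ls (s + 1) p.1 p.2 (by rw [hft2])
              simp; omega
          have hdrop : pvPred ((pvFindTitle ls (s + 1)).getD ("", (s + 1) + ls.length)).2 (s, l) = false := by
            simp [pvPred, hne, hh]
            intro _
            omega
          simp [hdrop]
        · -- title found here: the rest of A's loop is a plain filter
          have hstep : pvStepA ("", acc) l = (PySem.Str.strip (pvLstripHS l), acc) := by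
            simp [pvStepA, hne, hh]
          rw [hstep, foldA_titled ls _ acc hc]
          have hft : pvFindTitle (l :: ls) s = some (PySem.Str.strip (pvLstripHS l), s) := by
            simp [pvFindTitle, hne, hh, hc]
          rw [hft]
          have hdrop : pvPred s (s, l) = false := by
            simp [pvPred, hne, hh]
          simp [hdrop, enumFilter ls (s + 1) s (by omega)]

-- ===== VERDICT (by name: the statement is the Claim_ definition above) =====
theorem parse_jina_content_spec : Claim_equal_parse_jina_content := by
  intro content _
  show parse_jina_content content = parse_jina_content_alt content
  unfold parse_jina_content parse_jina_content_alt
  set raw := (PySem.Str.split? content "\n").getD [] with hraw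
  have hfold : raw.foldl (fun st line0 => pvStepA st (PySem.Str.strip line0)) ("", []) =
      (raw.map PySem.Str.strip).foldl pvStepA ("", []) := by
    rw [List.foldl_map]
  simp only [hfold]
  rw [pvCore (raw.map PySem.Str.strip) [] 0]
  simp
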